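-- pv_equiv track=rewrite | github.com/MarissaMC/NLP_Perceptron | ner/nelearn.py | word_type
-- ===== SOURCE A (Python) =====
-- import re, string
--
-- pun=set(string.punctuation)
--
-- def word_type(word):
--     buf=''
--     for w in word:
--         if w.isupper():
--            if buf[-1:]!='A':
--               buf+='A'
--         if w.islower():
--            if buf[-1:]!='a':
--               buf+='a'
--         if w in '0123456789':
--            if buf[-1:]!='9':
--               buf+='9'
--         if w in pun:
--            if buf[-1:]!='-':
--               buf+='-'
--     return buf
-- ===== SOURCE B (Python) =====
-- import re, string
--
-- pun = set(string.punctuation)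
--
-- _PUNCT = re.escape(string.punctuation)
-- _CLEAN = re.compile('[^A-Za-z0-9' + _PUNCT + ']+')
-- _STAGES = [(re.compile('[A-Z]+'), 'A'),
--            (re.compile('[a-z]+'), 'a'),
--            (re.compile('[0-9]+'), '9'),
--            (re.compile('[' + _PUNCT + ']+'), '-')]
--
-- def word_type(word):
--     # delete unclassifiable characters, then rewrite each maximal run of a
--     # class to its single code letter, one substitution pass per class
--     s = _CLEAN.sub('', word)
--     for pat, rep in _STAGES:
--         s = pat.sub(rep, s)
--     return s
-- ===== Notes on version B (the rewrite author's own statement) =====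
-- stated objective: alternative
-- what changed: Replaces A's single character loop with its buf[-1:] check by a rewriting pipeline: one regex pass deletes unclassifiable characters, then four regex substitution passes each rewrite every maximal run of one class ([A-Z]+, [a-z]+, [0-9]+, punctuation+) to its single code letter.
import Mathlib
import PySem

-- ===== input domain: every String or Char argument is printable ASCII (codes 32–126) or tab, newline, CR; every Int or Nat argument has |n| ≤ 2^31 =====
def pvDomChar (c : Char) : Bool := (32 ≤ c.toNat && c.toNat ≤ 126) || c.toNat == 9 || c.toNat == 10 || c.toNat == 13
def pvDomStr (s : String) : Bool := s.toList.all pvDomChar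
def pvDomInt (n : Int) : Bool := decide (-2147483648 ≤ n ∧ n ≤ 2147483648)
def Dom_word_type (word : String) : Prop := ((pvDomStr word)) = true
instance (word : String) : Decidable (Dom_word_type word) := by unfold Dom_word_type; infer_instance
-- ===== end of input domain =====

-- B replaces A's single interleaved buf[-1:]-checking loop by a rewriting pipeline:
-- delete unclassifiable characters, then four run-substitution passes (re.sub of
-- '[A-Z]+'→'A', '[a-z]+'→'a', '[0-9]+'→'9', '[punct]+'→'-'); objective: alternative.


-- ===== PORT A =====
-- string.punctuation as the literal list of its 32 characters (Python builds a set from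
-- this string and only tests membership, so membership in this distinct list is exact)
def punctChars : List Char :=
  ['!', '"', '#', '$', '%', '&', '\'', '(', ')', '*', '+', ',', '-', '.', '/',
   ':', ';', '<', '=', '>', '?', '@', '[', '\\', ']', '^', '_', '`', '{', '|', '}', '~']

-- buf[-1:] != 'X' on the string buf held as List Char: the length-1 tail slice differs
-- from the one-char string 'X' iff the last character is not X (empty slice ≠ 'X' always).
def lastNe (buf : List Char) (x : Char) : Bool := buf.getLast? != some x

-- one iteration of A's for-loop body: four independent ifs, in A's order
def wtStep (buf : List Char) (w : Char) : List Char :=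
  let buf := if PySem.Chars.isupper w then (if lastNe buf 'A' then buf ++ ['A'] else buf) else buf
  let buf := if PySem.Chars.islower w then (if lastNe buf 'a' then buf ++ ['a'] else buf) else buf
  let buf := if ("0123456789".toList).contains w then (if lastNe buf '9' then buf ++ ['9'] else buf) else buf
  let buf := if punctChars.contains w then (if lastNe buf '-' then buf ++ ['-'] else buf) else buf
  buf

def word_type (word : String) : String :=
  String.ofList (word.toList.foldl wtStep [])

-- ===== PORT B =====
-- the character classes of Source B's regexes, as Booleans (exact on the ASCII domain:
-- Python's [A-Z]/[a-z] coincide with str.isupper/str.islower there)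
def isU (c : Char) : Bool := PySem.Chars.isupper c
def isL (c : Char) : Bool := PySem.Chars.islower c
def isD (c : Char) : Bool := ("0123456789".toList).contains c
def isP (c : Char) : Bool := punctChars.contains c
def classified (c : Char) : Bool := isU c || isL c || isD c || isP c

-- re.sub('[p]+', r, s): replace each maximal run of p-characters by the single
-- character r (exact port of the single-class-run substitution Source B performs)
def subRuns (p : Char → Bool) (r : Char) : List Char → List Char
  | [] => []
  | c :: t =>
    if p c then r :: subRuns p r (t.dropWhile p)
    else c :: subRuns p r t
termination_by l => l.length
decreasing_by
  · simpa using Nat.lt_succ_of_le (List.length_dropWhile_le p t)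
  · simp

-- Source B: _CLEAN.sub('', word) = filter to classified chars, then the four stages in order
def word_type_alt (word : String) : String :=
  let s := word.toList.filter classified
  let s := subRuns isU 'A' s
  let s := subRuns isL 'a' s
  let s := subRuns isD '9' s
  let s := subRuns isP '-' s
  String.ofList s

-- ===== PRECONDITION & SPEC =====
def Spec_word_type (word : String) (out : String) : Prop := out = word_type_alt word
instance (word : String) (out : String) : Decidable (Spec_word_type word out) := by unfold Spec_word_type; infer_instance

-- ===== CLAIM (what is proved, stated in full; the proofs are below) =====
def Claim_equal_word_type : Prop := ∀ (word : String), Dom_word_type word → Spec_word_type word (word_type word)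

-- ===== LEMMAS AND PROOFS =====

-- the code character of a classified character (proof-side helper)
def code (c : Char) : Char :=
  if isU c then 'A' else if isL c then 'a' else if isD c then '9' else '-'

-- A's per-character effect, expressed through the classification
def codeOf (c : Char) : Option Char :=
  if isU c then some 'A'
  else if isL c then some 'a'
  else if isD c then some '9'
  else if isP c then some '-'
  else none

-- collapse relative to the previously emitted character (the loop's view of A's buffer)
def collapseFrom : Option Char → List Char → List Char
  | _, [] => []
  | last, c :: t => if some c = last then collapseFrom last t else c :: collapseFrom (some c) t

theorem upper_not_lower {c : Char} (h : isU c = true) : isL c = false := by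
  rw [Bool.eq_false_iff]
  intro hl
  simp [isU, PySem.Chars.isupper] at h
  simp [isL, PySem.Chars.islower] at hl
  exact absurd (le_trans hl.1 h.2) (by decide)

theorem upper_not_digit {c : Char} (h : isU c = true) : isD c = false := by
  rw [Bool.eq_false_iff]
  intro hd
  simp [isU, PySem.Chars.isupper] at h
  simp [isD] at hd
  rcases hd with rfl|rfl|rfl|rfl|rfl|rfl|rfl|rfl|rfl|rfl <;> exact absurd h (by decide)

theorem lower_not_digit {c : Char} (h : isL c = true) : isD c = false := by
  rw [Bool.eq_false_iff]
  intro hd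
  simp [isL, PySem.Chars.islower] at h
  simp [isD] at hd
  rcases hd with rfl|rfl|rfl|rfl|rfl|rfl|rfl|rfl|rfl|rfl <;> exact absurd h (by decide)

theorem punct_not_class {c : Char} (h : isP c = true) :
    isU c = false ∧ isL c = false ∧ isD c = false := by
  simp [isP, punctChars] at h
  rcases h with rfl|rfl|rfl|rfl|rfl|rfl|rfl|rfl|rfl|rfl|rfl|rfl|rfl|rfl|rfl|rfl|rfl|rfl|rfl|rfl|rfl|rfl|rfl|rfl|rfl|rfl|rfl|rfl|rfl|rfl|rfl|rfl <;> exact ⟨by decide, by decide, by decide⟩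

theorem lower_not_upper {c : Char} (h : isL c = true) : isU c = false := by
  rw [Bool.eq_false_iff]; intro hu; rw [upper_not_lower hu] at h; exact absurd h (by decide)

theorem digit_not_upper {c : Char} (h : isD c = true) : isU c = false := by
  rw [Bool.eq_false_iff]; intro hu; rw [upper_not_digit hu] at h; exact absurd h (by decide)

theorem digit_not_lower {c : Char} (h : isD c = true) : isL c = false := by
  rw [Bool.eq_false_iff]; intro hl; rw [lower_not_digit hl] at h; exact absurd h (by decide)

theorem upper_not_punct {c : Char} (h : isU c = true) : isP c = false := by
  rw [Bool.eq_false_iff]; intro hp; rw [(punct_not_class hp).1] at h; exact absurd h (by decide)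

theorem lower_not_punct {c : Char} (h : isL c = true) : isP c = false := by
  rw [Bool.eq_false_iff]; intro hp; rw [(punct_not_class hp).2.1] at h; exact absurd h (by decide)

theorem digit_not_punct {c : Char} (h : isD c = true) : isP c = false := by
  rw [Bool.eq_false_iff]; intro hp; rw [(punct_not_class hp).2.2] at h; exact absurd h (by decide)

-- ---- A side: the loop is run-collapse over the classification stream ----

theorem wtStep_eq_code (buf : List Char) (w : Char) :
    wtStep buf w = match codeOf w with
      | none => buf
      | some k => if buf.getLast? = some k then buf else buf ++ [k] := by
  by_cases hu : isU w = true
  · have hl := upper_not_lower hu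
    have hd := upper_not_digit hu
    have hp := upper_not_punct hu
    simp only [wtStep, codeOf, lastNe, isU, isL, isD, isP] at *
    simp only [hu, hl, hd, hp, if_true, Bool.false_eq_true, if_false]
    by_cases h : buf.getLast? = some 'A' <;> simp [h]
  · have hu' : isU w = false := by simpa using hu
    by_cases hl : isL w = true
    · have hd := lower_not_digit hl
      have hp := lower_not_punct hl
      simp only [wtStep, codeOf, lastNe, isU, isL, isD, isP] at *
      simp only [hu', hl, hd, hp, if_true, Bool.false_eq_true, if_false]
      by_cases h : buf.getLast? = some 'a' <;> simp [h]
    · have hl' : isL w = false := by simpa using hl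
      by_cases hd : isD w = true
      · have hp := digit_not_punct hd
        simp only [wtStep, codeOf, lastNe, isU, isL, isD, isP] at *
        simp only [hu', hl', hd, hp, if_true, Bool.false_eq_true, if_false]
        by_cases h : buf.getLast? = some '9' <;> simp [h]
      · have hd' : isD w = false := by simpa using hd
        by_cases hp : isP w = true
        · simp only [wtStep, codeOf, lastNe, isU, isL, isD, isP] at *
          simp only [hu', hl', hd', hp, if_true, Bool.false_eq_true, if_false]
          by_cases h : buf.getLast? = some '-' <;> simp [h]
        · have hp' : isP w = false := by simpa using hp
          simp only [wtStep, codeOf, lastNe, isU, isL, isD, isP] at *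
          simp only [hu', hl', hd', hp', Bool.false_eq_true, if_false]

theorem foldl_wtStep (l : List Char) : ∀ buf : List Char,
    l.foldl wtStep buf = buf ++ collapseFrom buf.getLast? (l.filterMap codeOf) := by
  induction l with
  | nil => intro buf; simp [collapseFrom]
  | cons c t ih =>
    intro buf
    simp only [List.foldl_cons, List.filterMap_cons, wtStep_eq_code]
    cases hc : codeOf c with
    | none => simp only []; exact ih buf
    | some k =>
      show List.foldl wtStep (if buf.getLast? = some k then buf else buf ++ [k]) t =
        buf ++ collapseFrom buf.getLast? (k :: List.filterMap codeOf t)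
      by_cases h : buf.getLast? = some k
      · rw [if_pos h, ih buf, h, collapseFrom, if_pos rfl]
      · rw [if_neg h, ih (buf ++ [k])]
        have hlast : (buf ++ [k]).getLast? = some k := by simp
        have h' : ¬ (some k = buf.getLast?) := fun he => h (Eq.symm he)
        rw [hlast, collapseFrom, if_neg h']
        simp

theorem codeOf_classified {c : Char} (h : classified c = true) : codeOf c = some (code c) := by
  unfold codeOf code
  split_ifs with h1 h2 h3 h4
  · rfl
  · rfl
  · rfl
  · rfl
  · simp only [classified, h1, h2, h3, h4] at h
    simp at h

theorem codeOf_unclassified {c : Char} (h : classified c = false) : codeOf c = none := by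
  simp only [classified, Bool.or_eq_false_iff] at h
  simp [codeOf, h.1.1.1, h.1.1.2, h.1.2, h.2]

theorem filterMap_codeOf (l : List Char) :
    l.filterMap codeOf = (l.filter classified).map code := by
  induction l with
  | nil => rfl
  | cons c t ih =>
    by_cases h : classified c = true
    · simp [codeOf_classified h, h, ih]
    · have h' : classified c = false := by simpa using h
      simp [codeOf_unclassified h', h', ih]

-- ---- B side: the substitution pipeline ----

def allCl (l : List Char) : Prop := ∀ c ∈ l, classified c = true

theorem allCl_dropWhile {l : List Char} (p : Char → Bool) (h : allCl l) :
    allCl (l.dropWhile p) :=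
  fun c hc => h c ((List.dropWhile_sublist p).subset hc)

-- a substitution pass for class p commutes with dropping a disjoint class q
theorem subRuns_dropWhile_aux (p q : Char → Bool) (r : Char)
    (hqr : q r = false) (hpq : ∀ c, q c = true → p c = false) :
    ∀ n (l : List Char), l.length ≤ n →
      (subRuns p r l).dropWhile q = subRuns p r (l.dropWhile q) := by
  intro n
  induction n with
  | zero =>
    intro l hn
    have : l = [] := List.eq_nil_of_length_eq_zero (Nat.le_zero.mp hn)
    subst this
    simp [subRuns]
  | succ n ih =>
    intro l hn
    match l with
    | [] => simp [subRuns]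
    | c :: t =>
      have hlen : t.length ≤ n := by simpa using hn
      by_cases hp : p c = true
      · rw [subRuns, if_pos hp]
        have hq : q c = false := by
          rw [Bool.eq_false_iff]; intro hqc; rw [hpq c hqc] at hp; exact absurd hp (by decide)
        rw [List.dropWhile_cons_of_neg (by simp [hqr]),
            List.dropWhile_cons_of_neg (by simp [hq])]
        rw [subRuns, if_pos hp]
      · have hp' : p c = false := by simpa using hp
        rw [subRuns, if_neg (by simp [hp'])]
        by_cases hq : q c = true
        · rw [List.dropWhile_cons_of_pos (by simp [hq]),
              List.dropWhile_cons_of_pos (by simp [hq])]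
          exact ih t hlen
        · have hq' : q c = false := by simpa using hq
          rw [List.dropWhile_cons_of_neg (by simp [hq']),
              List.dropWhile_cons_of_neg (by simp [hq'])]
          rw [subRuns, if_neg (by simp [hp'])]

theorem subRuns_dropWhile (p q : Char → Bool) (r : Char)
    (hqr : q r = false) (hpq : ∀ c, q c = true → p c = false) :
    ∀ l : List Char, (subRuns p r l).dropWhile q = subRuns p r (l.dropWhile q) :=
  fun l => subRuns_dropWhile_aux p q r hqr hpq l.length l le_rfl

-- skipping past the r-coded class equals dropping that class from the source
theorem collapseFrom_drop (p : Char → Bool) (r : Char)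
    (hpr : ∀ c, classified c = true → (code c = r ↔ p c = true)) :
    ∀ t : List Char, allCl t →
      collapseFrom (some r) (t.map code) = collapseFrom none ((t.dropWhile p).map code) := by
  intro t
  induction t with
  | nil => intro _; simp [List.dropWhile, collapseFrom]
  | cons c t ih =>
    intro h
    have hc := h c (by simp)
    by_cases hp : p c = true
    · have hcr : code c = r := (hpr c hc).2 hp
      rw [List.map_cons, collapseFrom, if_pos (by rw [hcr]), List.dropWhile_cons_of_pos hp]
      exact ih (fun d hd => h d (by simp [hd]))
    · have hne : ¬ (some (code c) = some r) := by
        intro he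
        exact hp ((hpr c hc).1 (Option.some.inj he))
      rw [List.map_cons, collapseFrom, if_neg hne,
          List.dropWhile_cons_of_neg (by simpa using hp), List.map_cons, collapseFrom,
          if_neg (by simp)]

-- the four code facts used case by case
theorem code_upper {c : Char} (h : isU c = true) : code c = 'A' := by simp [code, h]
theorem code_lower {c : Char} (h : isL c = true) : code c = 'a' := by
  simp [code, lower_not_upper h, h]
theorem code_digit {c : Char} (h : isD c = true) : code c = '9' := by
  simp [code, digit_not_upper h, digit_not_lower h, h]
theorem code_punct {c : Char} (h : isP c = true) : code c = '-' := by
  have := punct_not_class h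
  simp [code, this.1, this.2.1, this.2.2]

theorem hpr_U : ∀ c, classified c = true → (code c = 'A' ↔ isU c = true) := by
  intro c _
  constructor
  · intro h; by_contra hu
    have hu' : isU c = false := by simpa using hu
    simp [code, hu'] at h
    split_ifs at h <;> exact absurd h (by decide)
  · exact code_upper
theorem hpr_L : ∀ c, classified c = true → (code c = 'a' ↔ isL c = true) := by
  intro c _
  constructor
  · intro h; by_contra hl
    have hl' : isL c = false := by simpa using hl
    simp [code, hl'] at h
    split_ifs at h <;> exact absurd h (by decide)
  · exact code_lower
theorem hpr_D : ∀ c, classified c = true → (code c = '9' ↔ isD c = true) := by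
  intro c _
  constructor
  · intro h; by_contra hd
    have hd' : isD c = false := by simpa using hd
    simp [code, hd'] at h
    split_ifs at h <;> exact absurd h (by decide)
  · exact code_digit
theorem hpr_P : ∀ c, classified c = true → (code c = '-' ↔ isP c = true) := by
  intro c hc
  constructor
  · intro h; by_contra hp
    have hp' : isP c = false := by simpa using hp
    simp only [classified, hp', Bool.or_false, Bool.or_eq_true] at hc
    rcases hc with (hu | hl) | hd
    · rw [code_upper hu] at h; exact absurd h (by decide)
    · rw [code_lower hl] at h; exact absurd h (by decide)
    · rw [code_digit hd] at h; exact absurd h (by decide)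
  · exact code_punct

def pipeline (l : List Char) : List Char :=
  subRuns isP '-' (subRuns isD '9' (subRuns isL 'a' (subRuns isU 'A' l)))

theorem pipeline_eq_collapse : ∀ n (l : List Char), l.length ≤ n → allCl l →
    pipeline l = collapseFrom none (l.map code) := by
  intro n
  induction n with
  | zero =>
    intro l hn _
    have : l = [] := List.eq_nil_of_length_eq_zero (Nat.le_zero.mp hn)
    subst this
    simp [pipeline, subRuns, collapseFrom]
  | succ n ih =>
    intro l hn hcl
    match l with
    | [] => simp [pipeline, subRuns, collapseFrom]
    | c :: t =>
      have hc := hcl c (by simp)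
      have hlen : t.length ≤ n := by simpa using hn
      have hdlen : ∀ p : Char → Bool, (t.dropWhile p).length ≤ n :=
        fun p => le_trans (List.length_dropWhile_le p t) hlen
      have hcl' : allCl t := fun d hd => hcl d (by simp [hd])
      rw [List.map_cons, collapseFrom, if_neg (by simp)]
      have hclass : isU c = true ∨ isL c = true ∨ isD c = true ∨ isP c = true := by
        have := hc
        simp only [classified, Bool.or_eq_true] at this
        tauto
      rcases hclass with hu | hl | hd | hp
      · -- uppercase head
        rw [code_upper hu]
        unfold pipeline
        rw [subRuns, if_pos hu]
        rw [show subRuns isL 'a' ('A' :: subRuns isU 'A' (t.dropWhile isU)) =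
              'A' :: subRuns isL 'a' (subRuns isU 'A' (t.dropWhile isU)) from by
            rw [subRuns, if_neg (by decide)]]
        rw [show ∀ x, subRuns isD '9' ('A' :: x) = 'A' :: subRuns isD '9' x from fun x => by
            rw [subRuns, if_neg (by decide)]]
        rw [show ∀ x, subRuns isP '-' ('A' :: x) = 'A' :: subRuns isP '-' x from fun x => by
            rw [subRuns, if_neg (by decide)]]
        rw [show subRuns isP '-' (subRuns isD '9' (subRuns isL 'a' (subRuns isU 'A' (t.dropWhile isU)))) =
              pipeline (t.dropWhile isU) from rfl]
        rw [ih _ (hdlen isU) (allCl_dropWhile isU hcl'),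
            collapseFrom_drop isU 'A' hpr_U t hcl']
      · -- lowercase head
        rw [code_lower hl]
        unfold pipeline
        rw [subRuns, if_neg (by simp [lower_not_upper hl])]
        rw [subRuns, if_pos hl]
        rw [subRuns_dropWhile isU isL 'A' (by decide)
              (fun d hd => lower_not_upper hd)]
        rw [show ∀ x, subRuns isD '9' ('a' :: x) = 'a' :: subRuns isD '9' x from fun x => by
            rw [subRuns, if_neg (by decide)]]
        rw [show ∀ x, subRuns isP '-' ('a' :: x) = 'a' :: subRuns isP '-' x from fun x => by
            rw [subRuns, if_neg (by decide)]]
        rw [show subRuns isP '-' (subRuns isD '9' (subRuns isL 'a' (subRuns isU 'A' (t.dropWhile isL)))) =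
              pipeline (t.dropWhile isL) from rfl]
        rw [ih _ (hdlen isL) (allCl_dropWhile isL hcl'),
            collapseFrom_drop isL 'a' hpr_L t hcl']
      · -- digit head
        rw [code_digit hd]
        unfold pipeline
        rw [subRuns, if_neg (by simp [digit_not_upper hd])]
        rw [subRuns, if_neg (by simp [digit_not_lower hd])]
        rw [subRuns, if_pos hd]
        rw [subRuns_dropWhile isL isD 'a' (by decide) (fun d h => digit_not_lower h)]
        rw [subRuns_dropWhile isU isD 'A' (by decide) (fun d h => digit_not_upper h)]
        rw [show ∀ x, subRuns isP '-' ('9' :: x) = '9' :: subRuns isP '-' x from fun x => by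
            rw [subRuns, if_neg (by decide)]]
        rw [show subRuns isP '-' (subRuns isD '9' (subRuns isL 'a' (subRuns isU 'A' (t.dropWhile isD)))) =
              pipeline (t.dropWhile isD) from rfl]
        rw [ih _ (hdlen isD) (allCl_dropWhile isD hcl'),
            collapseFrom_drop isD '9' hpr_D t hcl']
      · -- punctuation head
        rw [code_punct hp]
        have hnp := punct_not_class hp
        unfold pipeline
        rw [subRuns, if_neg (by simp [hnp.1])]
        rw [subRuns, if_neg (by simp [hnp.2.1])]
        rw [subRuns, if_neg (by simp [hnp.2.2])]
        rw [subRuns, if_pos hp]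
        rw [subRuns_dropWhile isD isP '9' (by decide) (fun d h => (punct_not_class h).2.2)]
        rw [subRuns_dropWhile isL isP 'a' (by decide) (fun d h => (punct_not_class h).2.1)]
        rw [subRuns_dropWhile isU isP 'A' (by decide) (fun d h => (punct_not_class h).1)]
        rw [show subRuns isP '-' (subRuns isD '9' (subRuns isL 'a' (subRuns isU 'A' (t.dropWhile isP)))) =
              pipeline (t.dropWhile isP) from rfl]
        rw [ih _ (hdlen isP) (allCl_dropWhile isP hcl'),
            collapseFrom_drop isP '-' hpr_P t hcl']

-- ===== VERDICT (by name: the statement is the Claim_ definition above) =====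
theorem word_type_spec : Claim_equal_word_type := by
  intro word _
  unfold Spec_word_type word_type word_type_alt
  rw [foldl_wtStep]
  simp only [List.nil_append, List.getLast?_nil]
  rw [filterMap_codeOf]
  rw [← pipeline_eq_collapse (word.toList.filter classified).length _ le_rfl
        (fun c hc => (List.mem_filter.mp hc).2)]
  rfl
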